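-- pv_equiv track=rewrite | github.com/MMurdock777/PythonHomework | HW4/2.py | sentences_with_num
-- ===== SOURCE A (Python) =====
-- def sentences_with_num(sent: str) -> int:
--     sent_list = sent.split('.')
--     sent_with_num = 0
--     for i in sent_list:
--         for j in i:
--             if j.isnumeric():
--                 sent_with_num += 1
--                 break
--     return sent_with_num
-- ===== SOURCE B (Python) =====
-- def sentences_with_num(sent: str) -> int:
--     count = 0
--     has_num = False
--     for ch in sent:
--         if ch == '.':
--             if has_num:
--                 count += 1
--             has_num = False
--         else:
--             has_num = has_num or ch.isnumeric()
--     return count + (1 if has_num else 0)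
-- ===== Notes on version B (the rewrite author's own statement) =====
-- stated objective: alternative
-- what changed: Replaced the dot-split plus a nested per-segment scan by a single character pass maintaining a per-segment has_num flag and a counter, with a final check for the trailing segment; no intermediate list is built.
import Mathlib
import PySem

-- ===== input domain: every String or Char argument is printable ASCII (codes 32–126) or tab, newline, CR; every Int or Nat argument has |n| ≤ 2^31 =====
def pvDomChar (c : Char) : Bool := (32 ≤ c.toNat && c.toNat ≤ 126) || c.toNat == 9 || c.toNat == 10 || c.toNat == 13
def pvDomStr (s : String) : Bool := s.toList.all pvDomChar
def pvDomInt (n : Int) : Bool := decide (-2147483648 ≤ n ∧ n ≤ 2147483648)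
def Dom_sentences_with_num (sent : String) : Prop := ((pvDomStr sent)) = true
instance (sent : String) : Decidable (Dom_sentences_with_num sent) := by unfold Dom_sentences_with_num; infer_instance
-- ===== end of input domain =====

-- B replaces the dot-split plus nested per-segment scan by one character pass with a per-segment flag (same O(n) time, no intermediate list).

-- ===== PORT A =====
-- inner 'for j in i: if j.isnumeric(): sent_with_num += 1; break' — recursion stopping at the first numeric char
def pvSegHasNum : List Char → Bool
  | [] => false
  | c :: rest => if PySem.Chars.isdigit c then true else pvSegHasNum rest

def sentences_with_num (sent : String) : Int :=
  let sent_list := PySem.Chars.splitOn sent.toList ['.']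
  sent_list.foldl (fun sent_with_num i => if pvSegHasNum i then sent_with_num + 1 else sent_with_num) 0

-- ===== PORT B =====
def sentences_with_num_alt (sent : String) : Int :=
  let st := sent.toList.foldl
    (fun (st : Int × Bool) ch =>
      if ch = '.' then (if st.2 then st.1 + 1 else st.1, false)
      else (st.1, st.2 || PySem.Chars.isdigit ch))
    (0, false)
  st.1 + (if st.2 then 1 else 0)

-- ===== PRECONDITION & SPEC =====
def Spec_sentences_with_num (sent : String) (out : Int) : Prop := out = sentences_with_num_alt sent
instance (sent : String) (out : Int) : Decidable (Spec_sentences_with_num sent out) := by unfold Spec_sentences_with_num; infer_instance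

-- ===== CLAIM (what is proved, stated in full; the proofs are below) =====
def Claim_equal_sentences_with_num : Prop := ∀ (sent : String), Dom_sentences_with_num sent → Spec_sentences_with_num sent (sentences_with_num sent)

-- ===== LEMMAS AND PROOFS =====

-- simple back-to-front split on '.', the common reference point of both ports
def pvSplit : List Char → List (List Char)
  | [] => [[]]
  | c :: rest =>
    if c = '.' then [] :: pvSplit rest
    else match pvSplit rest with
      | [] => [[c]]
      | h :: t => (c :: h) :: t

def pvAppendHead (pre : List Char) : List (List Char) → List (List Char)
  | [] => [pre]
  | h :: t => (pre ++ h) :: t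

lemma pvSplit_ne_nil (cs : List Char) : pvSplit cs ≠ [] := by
  cases cs with
  | nil => simp [pvSplit]
  | cons c rest =>
    simp only [pvSplit]
    split_ifs
    · simp
    · cases h : pvSplit rest <;> simp

lemma pvGo_spec : ∀ (fuel : Nat) (l cur : List Char) (acc : List (List Char)),
    l.length < fuel →
    PySem.Chars.splitOn.go ['.'] fuel l cur acc = acc.reverse ++ pvAppendHead cur.reverse (pvSplit l) := by
  intro fuel
  induction fuel with
  | zero => intro l cur acc h; omega
  | succ f ih =>
    intro l cur acc h
    cases l with
    | nil => simp [PySem.Chars.splitOn.go, pvSplit, pvAppendHead]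
    | cons c rest =>
      by_cases hc : c = '.'
      · subst hc
        rw [show PySem.Chars.splitOn.go ['.'] (f+1) ('.' :: rest) cur acc
              = PySem.Chars.splitOn.go ['.'] f rest [] (cur.reverse :: acc) by
            simp [PySem.Chars.splitOn.go, List.isPrefixOf]]
        rw [ih rest [] (cur.reverse :: acc) (by simp at h ⊢; omega)]
        have hne := pvSplit_ne_nil rest
        cases hs : pvSplit rest with
        | nil => exact absurd hs hne
        | cons sh st => simp [pvSplit, pvAppendHead, hs]
      · rw [show PySem.Chars.splitOn.go ['.'] (f+1) (c :: rest) cur acc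
              = PySem.Chars.splitOn.go ['.'] f rest (c :: cur) acc by
            simp [PySem.Chars.splitOn.go, List.isPrefixOf]
            intro h; exact absurd h.symm hc]
        rw [ih rest (c :: cur) acc (by simp at h ⊢; omega)]
        have hne := pvSplit_ne_nil rest
        cases hs : pvSplit rest with
        | nil => exact absurd hs hne
        | cons sh st => simp [pvSplit, pvAppendHead, hs, hc]

lemma splitOn_eq_pvSplit (cs : List Char) :
    PySem.Chars.splitOn cs ['.'] = pvSplit cs := by
  have h := pvGo_spec (cs.length + 1) cs [] [] (by omega)
  have hne := pvSplit_ne_nil cs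
  cases hs : pvSplit cs with
  | nil => exact absurd hs hne
  | cons sh st =>
    rw [hs] at h
    simpa [PySem.Chars.splitOn, pvAppendHead, hs] using h

-- number of segments containing a numeric char
def pvCount (segs : List (List Char)) : Int :=
  segs.foldl (fun n i => if pvSegHasNum i then n + 1 else n) 0

lemma pvCount_foldl (segs : List (List Char)) (n : Int) :
    segs.foldl (fun n i => if pvSegHasNum i then n + 1 else n) n = n + pvCount segs := by
  induction segs generalizing n with
  | nil => simp [pvCount]
  | cons h t ih =>
    simp only [pvCount, List.foldl_cons]
    rw [ih, ih (if pvSegHasNum h then (0:Int) + 1 else 0)]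
    split_ifs <;> ring

lemma pvCount_cons (h : List Char) (t : List (List Char)) :
    pvCount (h :: t) = (if pvSegHasNum h then (1:Int) else 0) + pvCount t := by
  simp only [pvCount, List.foldl_cons]
  rw [pvCount_foldl, pvCount_foldl]
  split_ifs <;> ring

-- B's fold against pvSplit: 'has' marks that the current (first remaining) segment already saw a digit
def pvStep (st : Int × Bool) (ch : Char) : Int × Bool :=
  if ch = '.' then (if st.2 then st.1 + 1 else st.1, false)
  else (st.1, st.2 || PySem.Chars.isdigit ch)

lemma pvAlt_fold (cs : List Char) : ∀ (cnt : Int) (has : Bool),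
    (cs.foldl pvStep (cnt, has)).1 + (if (cs.foldl pvStep (cnt, has)).2 then (1:Int) else 0)
    = cnt + (match pvSplit cs with
             | [] => 0
             | h :: t => (if has || pvSegHasNum h then (1:Int) else 0) + pvCount t) := by
  induction cs with
  | nil => intro cnt has; cases has <;> simp [pvSplit, pvSegHasNum, pvCount]
  | cons c rest ih =>
    intro cnt has
    by_cases hc : c = '.'
    · subst hc
      have hstep : pvStep (cnt, has) '.' = ((if has then cnt + 1 else cnt : Int), false) := by
        simp [pvStep]
      simp only [List.foldl_cons, hstep]
      rw [ih (if has then cnt + 1 else cnt) false]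
      have hne := pvSplit_ne_nil rest
      cases hs : pvSplit rest with
      | nil => exact absurd hs hne
      | cons sh st =>
        rw [show pvSplit ('.' :: rest) = [] :: sh :: st by simp [pvSplit, hs]]
        dsimp only
        rw [pvCount_cons]
        simp only [pvSegHasNum, Bool.false_or, Bool.or_false]
        split_ifs <;> ring
    · have hstep : pvStep (cnt, has) c = (cnt, has || PySem.Chars.isdigit c) := by
        simp [pvStep, hc]
      simp only [List.foldl_cons, hstep]
      rw [ih cnt (has || PySem.Chars.isdigit c)]
      have hne := pvSplit_ne_nil rest
      cases hs : pvSplit rest with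
      | nil => exact absurd hs hne
      | cons sh st =>
        simp only [pvSplit, if_neg hc, hs, pvSegHasNum]
        by_cases hd : PySem.Chars.isdigit c = true <;> simp [hd]

-- ===== VERDICT (by name: the statement is the Claim_ definition above) =====
theorem sentences_with_num_spec : Claim_equal_sentences_with_num := by
  intro sent _
  unfold Spec_sentences_with_num sentences_with_num sentences_with_num_alt
  rw [splitOn_eq_pvSplit]
  have hB := pvAlt_fold sent.toList 0 false
  simp only [Bool.false_or] at hB
  show _ = (sent.toList.foldl pvStep (0, false)).1 +
      (if (sent.toList.foldl pvStep (0, false)).2 then (1:Int) else 0)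
  rw [hB]
  have hne := pvSplit_ne_nil sent.toList
  cases hs : pvSplit sent.toList with
  | nil => exact absurd hs hne
  | cons sh st =>
    show List.foldl _ 0 (sh :: st) = _
    simp only [List.foldl_cons]
    rw [pvCount_foldl]
    split_ifs <;> ring
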